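-- pv_equiv track=rewrite | github.com/2hoyeong/algorithm | programmers/lv2/131704.py | solution
-- ===== SOURCE A (Python) =====
-- def solution(order):
--     st = []
--     answer = 0
--     for i in range(1, len(order) + 1):
--         if order[answer] == i:
--             answer += 1
--         else:
--             st.append(i)
--
--         while len(st) > 0:
--             if st[-1] == order[answer]:
--                 st.pop()
--                 answer += 1
--             else:
--                 break
--     return answer
-- ===== SOURCE B (Python) =====
-- def solution(order):
--     n = len(order)
--     st = []
--     nxt = 1
--     answer = 0
--     for target in order:
--         if st and st[-1] == target:
--             st.pop()
--             answer += 1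
--         else:
--             while nxt <= n and nxt != target:
--                 st.append(nxt)
--                 nxt += 1
--             if nxt <= n:
--                 nxt += 1
--                 answer += 1
--             else:
--                 break
--     return answer
-- ===== Notes on version B (the rewrite author's own statement) =====
-- stated objective: alternative
-- what changed: B drives the loop over the target sequence `order` with a next-incoming-box pointer that pulls boxes on demand, instead of A's loop over incoming boxes 1..n with an inner pop-while; same linear stack process, different decomposition.
import Mathlib
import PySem

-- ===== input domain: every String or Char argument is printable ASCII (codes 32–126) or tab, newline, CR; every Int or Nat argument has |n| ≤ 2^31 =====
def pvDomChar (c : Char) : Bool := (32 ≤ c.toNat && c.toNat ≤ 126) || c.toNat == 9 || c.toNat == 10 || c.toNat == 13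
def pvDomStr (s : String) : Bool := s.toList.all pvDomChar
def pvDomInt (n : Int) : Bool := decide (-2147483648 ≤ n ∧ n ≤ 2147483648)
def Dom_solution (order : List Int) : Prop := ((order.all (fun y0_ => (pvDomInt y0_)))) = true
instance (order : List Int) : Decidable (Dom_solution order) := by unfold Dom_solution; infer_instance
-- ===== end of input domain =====

-- B drives the loop over the target sequence `order` (pulling incoming boxes on demand)
-- instead of A's loop over incoming boxes 1..n: a different decomposition of the same
-- stack process, same cost. Equivalence of return values is proved for all inputs.

-- ===== PORT A =====
-- the inner `while len(st)>0: if st[-1]==order[answer]: pop; answer+=1 else break`.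
-- Stack is held top-first (Python append/pop at the end ↔ cons/tail at the head).
-- The `none` branch (order[answer] out of range, where Python would raise IndexError)
-- is unreachable: answer + len(st) = boxes consumed ≤ len(order) bounds answer.
def popLoopA (order : List Int) : List Int → Int → List Int × Int
  | [], a => ([], a)
  | t :: rest, a =>
      match PySem.List.pyGet? order a with
      | some v => if t = v then popLoopA order rest (a + 1) else (t :: rest, a)
      | none => (t :: rest, a)

-- one iteration of A's `for i in range(1, len(order)+1)` body
def stepA (order : List Int) (s : List Int × Int) (i : Int) : List Int × Int :=
  let s' := if PySem.List.pyGet? order s.2 = some i then (s.1, s.2 + 1) else (i :: s.1, s.2)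
  popLoopA order s'.1 s'.2

def solution (order : List Int) : Int :=
  ((PySem.List.pyRange 1 ((order.length : Int) + 1) 1).foldl (stepA order) ([], 0)).2

-- ===== PORT B =====
-- Source B's `while nxt <= n and nxt != target: st.append(nxt); nxt += 1`
def pullB (n t : Int) (nxt : Int) (st : List Int) : Int × List Int :=
  if h : nxt ≤ n ∧ nxt ≠ t then pullB n t (nxt + 1) (nxt :: st) else (nxt, st)
termination_by (n + 1 - nxt).toNat
decreasing_by omega

-- Source B's `for target in order` with early `break` (returning answer)
def goB (n : Int) : List Int → List Int → Int → Int → Int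
  | [], _, _, a => a
  | t :: rest, st, nxt, a =>
      if st.head? = some t then goB n rest st.tail nxt (a + 1)
      else
        let p := pullB n t nxt st
        if p.1 ≤ n then goB n rest p.2 (p.1 + 1) (a + 1) else a

def solution_alt (order : List Int) : Int :=
  goB (order.length : Int) order [] 1 0

-- ===== PRECONDITION & SPEC =====
def Spec_solution (order : List Int) (out : Int) : Prop := out = solution_alt order
instance (order : List Int) (out : Int) : Decidable (Spec_solution order out) := by unfold Spec_solution; infer_instance

-- ===== CLAIM (what is proved, stated in full; the proofs are below) =====
def Claim_equal_solution : Prop := ∀ (order : List Int), Dom_solution order → Spec_solution order (solution order)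

-- ===== LEMMAS AND PROOFS =====

-- popLoopA from a Nat index j pops k targets: the result is a fixpoint, the stack
-- shrinks by k, and goB absorbs exactly those k pops (one goB step per pop).
theorem popLoopA_spec (order : List Int) :
    ∀ (st : List Int) (j : Nat), ∃ (k : Nat) (st' : List Int),
      popLoopA order st (j : Int) = (st', ((j + k : Nat) : Int)) ∧
      st'.length + k = st.length ∧
      popLoopA order st' ((j + k : Nat) : Int) = (st', ((j + k : Nat) : Int)) ∧
      ∀ (n nxt : Int), goB n (order.drop j) st nxt (j : Int)
        = goB n (order.drop (j + k)) st' nxt ((j + k : Nat) : Int) := by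
  intro st
  induction st with
  | nil =>
      intro j
      exact ⟨0, [], by simp [popLoopA], by simp, by simp [popLoopA], fun n nxt => by simp⟩
  | cons v rest ih =>
      intro j
      cases hg : PySem.List.pyGet? order (j : Int) with
      | none =>
          refine ⟨0, v :: rest, ?_, by simp, ?_, fun n nxt => by simp⟩ <;>
            simp [popLoopA, hg]
      | some u =>
          by_cases hv : v = u
          · obtain ⟨k, st', h1, h2, h3, h4⟩ := ih (j + 1)
            refine ⟨k + 1, st', ?_, ?_, ?_, ?_⟩
            · have he : popLoopA order (v :: rest) (j : Int)
                  = popLoopA order rest ((j : Int) + 1) := by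
                simp [popLoopA, hg, hv]
              rw [he, show ((j : Int) + 1) = ((j + 1 : Nat) : Int) by push_cast; ring, h1]
              congr 2
              omega
            · simp only [List.length_cons]; omega
            · rw [show j + (k + 1) = j + 1 + k from by omega]
              exact h3
            · intro n nxt
              -- j is in range since pyGet? returned some
              have hj : j < order.length := by
                by_contra h
                have : PySem.List.pyGet? order (j : Int) = order[j]? :=
                  PySem.List.pyGet?_natCast order j
                rw [this, List.getElem?_eq_none (by omega)] at hg
                simp at hg
              have hu : order[j] = u := by
                have : PySem.List.pyGet? order (j : Int) = some order[j] := by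
                  rw [PySem.List.pyGet?_natCast order j, List.getElem?_eq_getElem hj]
                rw [this] at hg; exact Option.some.inj hg
              have hdrop : order.drop j = u :: order.drop (j + 1) := by
                rw [List.drop_eq_getElem_cons hj, hu]
              rw [hdrop]
              have hstep : goB n (u :: order.drop (j + 1)) (v :: rest) nxt (j : Int)
                  = goB n (order.drop (j + 1)) rest nxt ((j : Int) + 1) := by
                simp [goB, hv]
              rw [hstep]
              have hc : ((j : Int) + 1) = ((j + 1 : Nat) : Int) := by push_cast; ring
              rw [hc, h4 n nxt, show j + (k + 1) = j + 1 + k from by omega]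
          · refine ⟨0, v :: rest, ?_, by simp, ?_, fun n nxt => by simp⟩ <;>
              simp [popLoopA, hg, hv]

-- the main simulation: A's fold over the remaining boxes nxt..n, started from a
-- popLoopA-fixpoint state (st, j) with j + |st| = nxt - 1, computes goB on the
-- remaining targets.
theorem simAB (order : List Int) :
    ∀ (m : Nat) (j : Nat) (st : List Int) (nxt : Int),
      nxt = (order.length : Int) + 1 - m →
      1 ≤ nxt →
      (j : Int) + st.length = nxt - 1 →
      popLoopA order st (j : Int) = (st, (j : Int)) →
      ((PySem.List.pyRange nxt ((order.length : Int) + 1) 1).foldl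
          (stepA order) (st, (j : Int))).2
        = goB (order.length : Int) (order.drop j) st nxt (j : Int) := by
  intro m
  induction m with
  | zero =>
      intro j st nxt hm h1 hlen hfix
      have hn : nxt = (order.length : Int) + 1 := by omega
      subst hn
      rw [PySem.List.pyRange_one_eq_nil (le_refl _)]
      simp only [List.foldl_nil]
      -- j + |st| = n
      cases st with
      | nil =>
          have hj : j = order.length := by simp at hlen; omega
          rw [hj]; simp [goB]
      | cons s0 srest =>
          have hj : j < order.length := by simp at hlen; omega
          have hg : PySem.List.pyGet? order (j : Int) = some order[j] := by
            rw [PySem.List.pyGet?_natCast order j, List.getElem?_eq_getElem hj]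
          have hdrop : order.drop j = order[j] :: order.drop (j + 1) :=
            List.drop_eq_getElem_cons hj
          have hne : s0 ≠ order[j] := by
            intro he
            rw [show popLoopA order (s0 :: srest) (j : Int)
                = popLoopA order srest ((j : Int) + 1) by simp [popLoopA, hg, he]] at hfix
            obtain ⟨k, st', h1', _, _, _⟩ := popLoopA_spec order srest (j + 1)
            rw [show ((j : Int) + 1) = ((j + 1 : Nat) : Int) by push_cast; ring, h1'] at hfix
            have := congrArg Prod.snd hfix
            simp at this
            omega
          rw [hdrop]
          have hpull : pullB (order.length : Int) order[j] ((order.length : Int) + 1) (s0 :: srest)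
              = ((order.length : Int) + 1, s0 :: srest) := by
            rw [pullB, dif_neg (by rintro ⟨hA, hB⟩; omega)]
          simp only [goB, List.head?_cons]
          rw [if_neg (by simpa using hne), hpull]
          rw [if_neg (by omega)]
  | succ m ih =>
      intro j st nxt hm h1 hlen hfix
      have hnxt : nxt ≤ (order.length : Int) := by omega
      rw [PySem.List.pyRange_one_cons (by omega)]
      simp only [List.foldl_cons]
      have hj : j < order.length := by omega
      have hg : PySem.List.pyGet? order (j : Int) = some order[j] := by
        rw [PySem.List.pyGet?_natCast order j, List.getElem?_eq_getElem hj]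
      have hdrop : order.drop j = order[j] :: order.drop (j + 1) :=
        List.drop_eq_getElem_cons hj
      by_cases ht : order[j] = nxt
      · -- direct delivery: A takes the `answer += 1` branch then pops
        have hstep : stepA order (st, (j : Int)) nxt = popLoopA order st ((j : Int) + 1) := by
          simp [stepA, hg, ht]
        rw [hstep]
        obtain ⟨k, st', hp1, hp2, hp3, hp4⟩ := popLoopA_spec order st (j + 1)
        rw [show ((j : Int) + 1) = ((j + 1 : Nat) : Int) by push_cast; ring, hp1]
        have hIH := ih (j + 1 + k) st' (nxt + 1) (by omega) (by omega)
          (by push_cast; omega) hp3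
        rw [hIH]
        -- B side: target order[j] = nxt, top ≠ target (fixpoint), pull stops at once
        have hne : st.head? ≠ some order[j] := by
          cases st with
          | nil => simp
          | cons s0 srest =>
              simp only [List.head?_cons, ne_eq, Option.some.injEq]
              intro he
              rw [show popLoopA order (s0 :: srest) (j : Int)
                  = popLoopA order srest ((j : Int) + 1) by simp [popLoopA, hg, he]] at hfix
              obtain ⟨k', st'', h1', _, _, _⟩ := popLoopA_spec order srest (j + 1)
              rw [show ((j : Int) + 1) = ((j + 1 : Nat) : Int) by push_cast; ring, h1'] at hfix
              have := congrArg Prod.snd hfix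
              simp at this
              omega
        have hpull : pullB (order.length : Int) order[j] nxt st = (nxt, st) := by
          rw [pullB, dif_neg (by rintro ⟨hA, hB⟩; exact hB ht.symm)]
        rw [hdrop]
        simp only [goB]
        rw [if_neg hne, hpull]
        rw [if_pos (by omega)]
        rw [show ((j : Int) + 1) = ((j + 1 : Nat) : Int) by push_cast; ring, hp4]
      · -- mismatch: A pushes nxt; the pushed box is not poppable
        have hstep : stepA order (st, (j : Int)) nxt = (nxt :: st, (j : Int)) := by
          simp only [stepA, hg]
          rw [if_neg (by simp; omega)]
          simp [popLoopA, hg]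
          omega
        rw [hstep]
        have hfix' : popLoopA order (nxt :: st) (j : Int) = (nxt :: st, (j : Int)) := by
          simp [popLoopA, hg]
          omega
        have hIH := ih j (nxt :: st) (nxt + 1) (by omega) (by omega)
          (by simp; omega) hfix'
        rw [hIH]
        -- B side: both states take the else branch and pull to the same point
        have hne : st.head? ≠ some order[j] := by
          cases st with
          | nil => simp
          | cons s0 srest =>
              simp only [List.head?_cons, ne_eq, Option.some.injEq]
              intro he
              rw [show popLoopA order (s0 :: srest) (j : Int)
                  = popLoopA order srest ((j : Int) + 1) by simp [popLoopA, hg, he]] at hfix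
              obtain ⟨k', st'', h1', _, _, _⟩ := popLoopA_spec order srest (j + 1)
              rw [show ((j : Int) + 1) = ((j + 1 : Nat) : Int) by push_cast; ring, h1'] at hfix
              have := congrArg Prod.snd hfix
              simp at this
              omega
        have hpull : pullB (order.length : Int) order[j] nxt st
            = pullB (order.length : Int) order[j] (nxt + 1) (nxt :: st) := by
          rw [pullB, dif_pos ⟨hnxt, fun he => ht he.symm⟩]
        rw [hdrop]
        simp only [goB, List.head?_cons]
        rw [if_neg hne, if_neg (by simp; exact fun he => ht he.symm), hpull]

-- ===== VERDICT (by name: the statement is the Claim_ definition above) =====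
theorem solution_spec : Claim_equal_solution := by
  intro order _
  unfold Spec_solution solution solution_alt
  have h := simAB order order.length 0 [] 1 (by omega) (by omega)
    (by simp) (by simp [popLoopA])
  simpa using h
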